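-- pv_equiv track=rewrite | github.com/pranavrc/tagspace | cluster.py | segment_sessions
-- ===== SOURCE A (Python) =====
-- def segment_sessions(queries, session_interval, accumulator=[]):
--     ''' Segment a list of queries into sessions, each
--     spanning a session interval. '''
--     end_time = queries[0][1] + session_interval
--     session_list = []
--
--     for query_idx in range(len(queries)):
--         if queries[query_idx][1] <= end_time:
--             session_list.append(queries[query_idx][0])
--         else:
--             return segment_sessions(queries[query_idx:],
--                                     session_interval,
--                                     accumulator=accumulator + [session_list])
--
--     return accumulator + [session_list]
-- ===== SOURCE B (Python) =====
-- def segment_sessions(queries, session_interval, accumulator=[]):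
--     ''' Segment a list of queries into sessions, each
--     spanning a session interval. '''
--     result = list(accumulator)
--     end_time = queries[0][1] + session_interval
--     session = []
--     for name, t in queries:
--         if t <= end_time:
--             session.append(name)
--         else:
--             result.append(session)
--             session = [name]
--             end_time = t + session_interval
--     result.append(session)
--     return result
-- ===== Notes on version B (the rewrite author's own statement) =====
-- stated objective: idiomatic
-- what changed: Replaced A's tail recursion with list slicing and accumulator concatenation at each session boundary by a single iterative pass that tracks the current session's end_time and appends in place.
import Mathlib
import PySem

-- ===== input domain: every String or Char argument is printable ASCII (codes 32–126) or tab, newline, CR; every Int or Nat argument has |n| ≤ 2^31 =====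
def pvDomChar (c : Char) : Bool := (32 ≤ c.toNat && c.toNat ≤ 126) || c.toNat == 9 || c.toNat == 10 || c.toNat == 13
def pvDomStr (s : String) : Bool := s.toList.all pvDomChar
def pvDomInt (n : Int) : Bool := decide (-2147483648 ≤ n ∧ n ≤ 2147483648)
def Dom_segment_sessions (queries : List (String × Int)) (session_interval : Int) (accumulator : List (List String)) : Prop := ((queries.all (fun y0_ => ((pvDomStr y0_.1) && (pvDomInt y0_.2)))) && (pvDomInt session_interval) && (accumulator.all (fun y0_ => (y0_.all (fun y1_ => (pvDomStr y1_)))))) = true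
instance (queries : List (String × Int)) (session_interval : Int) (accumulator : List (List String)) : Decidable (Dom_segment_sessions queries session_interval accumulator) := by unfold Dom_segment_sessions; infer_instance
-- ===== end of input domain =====

-- B replaces A's recursion-with-slicing by one iterative pass tracking the current
-- session's end_time (objective: idiomatic single loop, no slicing or recursion).

-- ===== PORT A =====
-- A's inner for-loop: appends query names while their time is ≤ end_time; at the first
-- query exceeding end_time it early-returns the current session together with the
-- remaining suffix queries[query_idx:] (which is exactly the list at that point).
def segAloop (rest : List (String × Int)) (end_time : Int) (session_list : List String) :
    List String × Option (List (String × Int)) :=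
  match rest with
  | [] => (session_list, none)
  | q :: rs =>
    if q.2 ≤ end_time then segAloop rs end_time (session_list ++ [q.1])
    else (session_list, some (q :: rs))

-- A's tail recursion, made total with fuel (Python A recurses forever when
-- session_interval < 0 — outside Pre_ — and raises IndexError on []; both guards
-- only make the same computation total).
def segAfuel (fuel : Nat) (queries : List (String × Int)) (session_interval : Int)
    (accumulator : List (List String)) : List (List String) :=
  match fuel with
  | 0 => accumulator
  | fuel + 1 =>
    match queries with
    | [] => accumulator
    | q0 :: _ =>
      match segAloop queries (q0.2 + session_interval) [] with
      | (sl, none) => accumulator ++ [sl]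
      | (sl, some rest) => segAfuel fuel rest session_interval (accumulator ++ [sl])

def segment_sessions (queries : List (String × Int)) (session_interval : Int) (accumulator : List (List String)) : List (List String) :=
  segAfuel (queries.length + 1) queries session_interval accumulator

-- ===== PORT B =====
-- B's single for-loop: current session `cur`, its `end_time`, output built in place.
def segBgo (rest : List (String × Int)) (session_interval : Int) (end_time : Int)
    (cur : List String) (result : List (List String)) : List (List String) :=
  match rest with
  | [] => result ++ [cur]
  | (name, t) :: rs =>
    if t ≤ end_time then segBgo rs session_interval end_time (cur ++ [name]) result
    else segBgo rs session_interval (t + session_interval) [name] (result ++ [cur])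

def segment_sessions_alt (queries : List (String × Int)) (session_interval : Int) (accumulator : List (List String)) : List (List String) :=
  match queries with
  | [] => accumulator   -- Python B raises IndexError here, like A; outside Pre_
  | q0 :: _ => segBgo queries session_interval (q0.2 + session_interval) [] accumulator

-- ===== PRECONDITION & SPEC =====
-- Pre_ excludes exactly the inputs on which Python A raises: empty queries
-- (IndexError on queries[0]) and a negative session_interval (the first query then
-- always exceeds end_time, so A recurses on the unchanged list: RecursionError).
def Pre_segment_sessions (queries : List (String × Int)) (session_interval : Int) (accumulator : List (List String)) : Prop :=
  queries ≠ [] ∧ 0 ≤ session_interval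
instance (queries : List (String × Int)) (session_interval : Int) (accumulator : List (List String)) : Decidable (Pre_segment_sessions queries session_interval accumulator) := by unfold Pre_segment_sessions; infer_instance

def pvWitness_segment_sessions : (List (String × Int)) × Int × List (List String) :=
  ([("a", 1), ("b", 2), ("c", 9)], 3, [["z"]])

def Spec_segment_sessions (queries : List (String × Int)) (session_interval : Int) (accumulator : List (List String)) (out : List (List String)) : Prop := out = segment_sessions_alt queries session_interval accumulator
instance (queries : List (String × Int)) (session_interval : Int) (accumulator : List (List String)) (out : List (List String)) : Decidable (Spec_segment_sessions queries session_interval accumulator out) := by unfold Spec_segment_sessions; infer_instance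

-- ===== CLAIM (what is proved, stated in full; the proofs are below) =====
def Claim_equal_segment_sessions : Prop := ∀ (queries : List (String × Int)) (session_interval : Int) (accumulator : List (List String)), Dom_segment_sessions queries session_interval accumulator → Pre_segment_sessions queries session_interval accumulator → Spec_segment_sessions queries session_interval accumulator (segment_sessions queries session_interval accumulator)

-- ===== LEMMAS AND PROOFS =====

-- The suffix returned by A's early return is no longer than the scanned list.
theorem segAloop_some_length (rest : List (String × Int)) (et : Int) (sl sl' : List String)
    (r : List (String × Int)) (h : segAloop rest et sl = (sl', some r)) :
    r.length ≤ rest.length := by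
  induction rest generalizing sl with
  | nil => simp [segAloop] at h
  | cons q rs ih =>
    simp only [segAloop] at h
    split at h
    · exact Nat.le_trans (ih _ h) (Nat.le_succ _)
    · cases h; exact Nat.le_refl _

-- A's early return always carries a nonempty suffix.
theorem segAloop_some_ne_nil (rest : List (String × Int)) (et : Int) (sl sl' : List String)
    (r : List (String × Int)) (h : segAloop rest et sl = (sl', some r)) : r ≠ [] := by
  induction rest generalizing sl with
  | nil => simp [segAloop] at h
  | cons q rs ih =>
    simp only [segAloop] at h
    split at h
    · exact ih _ h
    · cases h; simp

-- B's loop computes A's loop followed by A's recursive continuation.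
theorem segBgo_eq_segAloop (rest : List (String × Int)) (iv et : Int) (cur : List String)
    (acc : List (List String)) (hiv : 0 ≤ iv) :
    segBgo rest iv et cur acc =
      match segAloop rest et cur with
      | (sl, none) => acc ++ [sl]
      | (sl, some r) => segBgo r iv ((r.headD ("", 0)).2 + iv) [] (acc ++ [sl]) := by
  induction rest generalizing et cur acc with
  | nil => simp [segBgo, segAloop]
  | cons q rs ih =>
    obtain ⟨name, t⟩ := q
    by_cases h : t ≤ et
    · simpa [segBgo, segAloop, h] using ih et (cur ++ [name]) acc
    · simp only [segBgo, segAloop, h, if_false]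
      have h2 : t ≤ t + iv := by omega
      simp [h2]

theorem segAfuel_eq_alt (fuel : Nat) (queries : List (String × Int)) (iv : Int)
    (acc : List (List String)) (hiv : 0 ≤ iv) (hfuel : queries.length < fuel) :
    segAfuel fuel queries iv acc = segment_sessions_alt queries iv acc := by
  induction fuel generalizing queries acc with
  | zero => omega
  | succ f ih =>
    match queries with
    | [] => simp [segAfuel, segment_sessions_alt]
    | q0 :: rest =>
      have hq0 : q0.2 ≤ q0.2 + iv := by omega
      simp only [segAfuel, segment_sessions_alt]
      rw [segBgo_eq_segAloop _ _ _ _ _ hiv]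
      cases hloop : segAloop (q0 :: rest) (q0.2 + iv) [] with
      | mk sl orest =>
        cases orest with
        | none => simp
        | some r =>
          -- r is a strict sublist: the first element q0 was consumed
          have hr : r.length ≤ rest.length := by
            simp only [segAloop, hq0, if_pos] at hloop
            exact segAloop_some_length _ _ _ _ _ hloop
          have hrf : r.length < f := by
            simp only [List.length_cons] at hfuel; omega
          simp only
          rw [ih r (acc ++ [sl]) hrf]
          cases r with
          | nil =>
            exact absurd rfl (segAloop_some_ne_nil _ _ _ _ _
              (by simpa [segAloop, hq0] using hloop))
          | cons r0 rr => simp [segment_sessions_alt]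

-- ===== VERDICT (by name: the statement is the Claim_ definition above) =====
theorem segment_sessions_spec : Claim_equal_segment_sessions := by
  intro queries iv acc _ hpre
  unfold Spec_segment_sessions segment_sessions
  exact segAfuel_eq_alt _ _ _ _ hpre.2 (Nat.lt_succ_self _)
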